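-- pv_equiv track=rewrite | github.com/Leoric-pl/WORDS | WordOperationsIII.py | lettersInSeq
-- ===== SOURCE A (Python) =====
-- def lettersInSeq(short,long):
--     result=''
--     currS=0
--     for i in long:
--         if(currS==len(short)):
--             return result
--         elif(short[currS]==i):
--             result+=short[currS]
--             currS+=1
--             if(currS==len(short)):
--                 return result
--     return result
-- ===== SOURCE B (Python) =====
-- def lettersInSeq(short, long):
--     out = []
--     pos = 0
--     for c in short:
--         idx = long.find(c, pos)
--         if idx == -1:
--             break
--         out.append(c)
--         pos = idx + 1
--     return ''.join(out)
-- ===== Notes on version B (the rewrite author's own statement) =====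
-- stated objective: alternative
-- what changed: Loop over short with a cursor into long using str.find(c, pos), instead of scanning long once character by character against a pointer into short.
import Mathlib
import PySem

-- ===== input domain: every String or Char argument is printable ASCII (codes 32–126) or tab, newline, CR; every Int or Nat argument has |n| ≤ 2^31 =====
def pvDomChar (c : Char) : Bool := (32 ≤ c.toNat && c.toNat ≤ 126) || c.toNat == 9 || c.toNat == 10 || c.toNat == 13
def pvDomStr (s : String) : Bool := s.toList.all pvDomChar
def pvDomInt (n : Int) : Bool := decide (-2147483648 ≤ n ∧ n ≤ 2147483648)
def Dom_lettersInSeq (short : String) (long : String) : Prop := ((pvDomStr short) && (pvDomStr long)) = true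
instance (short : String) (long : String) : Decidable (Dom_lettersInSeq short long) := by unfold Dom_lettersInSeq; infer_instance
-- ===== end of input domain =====

-- B drives the loop over `short` with a find-from cursor into `long` instead of scanning
-- `long` once against a pointer into `short`; alternative decomposition, same cost.


-- ===== PORT A =====
-- A's loop over `long` with the early returns on currS == len(short); result is kept as
-- a List Char and wrapped with String.ofList at the end (Python string concatenation).
def lettersInSeqGoA (s : List Char) (l : List Char) (result : List Char) (currS : Nat) :
    List Char :=
  match l with
  | [] => result
  | i :: rest =>
    if currS = s.length then result
    else if s[currS]? = some i then                -- short[currS] == i (in range here)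
      if currS + 1 = s.length then result ++ [i]
      else lettersInSeqGoA s rest (result ++ [i]) (currS + 1)
    else lettersInSeqGoA s rest result currS

def lettersInSeq (short : String) (long : String) : String :=
  String.ofList (lettersInSeqGoA short.toList long.toList [] 0)

-- ===== PORT B =====
-- long.find(c, pos): first index ≥ pos of c in l, ported by hand via idxOf? on the
-- drop (exact: Python's find returns -1 ↦ none).
def lettersInSeqFindFrom (l : List Char) (c : Char) (pos : Nat) : Option Nat :=
  ((l.drop pos).idxOf? c).map (fun j => pos + j)

def lettersInSeqGoB (l : List Char) (s : List Char) (pos : Nat) : List Char :=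
  match s with
  | [] => []
  | c :: rest =>
    match lettersInSeqFindFrom l c pos with
    | none => []                                   -- idx == -1: break
    | some idx => c :: lettersInSeqGoB l rest (idx + 1)

def lettersInSeq_alt (short : String) (long : String) : String :=
  String.ofList (lettersInSeqGoB long.toList short.toList 0)

-- ===== PRECONDITION & SPEC =====
def Spec_lettersInSeq (short : String) (long : String) (out : String) : Prop := out = lettersInSeq_alt short long
instance (short : String) (long : String) (out : String) : Decidable (Spec_lettersInSeq short long out) := by unfold Spec_lettersInSeq; infer_instance

-- ===== CLAIM (what is proved, stated in full; the proofs are below) =====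
def Claim_equal_lettersInSeq : Prop := ∀ (short : String) (long : String), Dom_lettersInSeq short long → Spec_lettersInSeq short long (lettersInSeq short long)

-- ===== LEMMAS AND PROOFS =====

-- Reference form: greedy match of s against l.
def lettersInSeqGreedy : List Char → List Char → List Char
  | _, [] => []
  | [], _ => []
  | c :: s', i :: l' =>
    if c = i then c :: lettersInSeqGreedy s' l' else lettersInSeqGreedy (c :: s') l'

lemma greedy_nil_left (l : List Char) : lettersInSeqGreedy [] l = [] := by
  cases l <;> simp [lettersInSeqGreedy]

lemma goA_eq_greedy (l : List Char) :
    ∀ (s acc : List Char) (k : Nat), k ≤ s.length →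
      lettersInSeqGoA s l acc k = acc ++ lettersInSeqGreedy (s.drop k) l := by
  induction l with
  | nil => intro s acc k _; simp [lettersInSeqGoA, lettersInSeqGreedy]
  | cons i rest ih =>
    intro s acc k hk
    by_cases hend : k = s.length
    · have : s.drop k = [] := by simp [hend]
      simp [lettersInSeqGoA, hend, greedy_nil_left]
    · have hlt : k < s.length := lt_of_le_of_ne hk hend
      obtain ⟨c, hc⟩ : ∃ c, s[k]? = some c := ⟨s[k], List.getElem?_eq_getElem hlt⟩
      have hdrop : s.drop k = c :: s.drop (k + 1) := by
        have := List.getElem?_eq_some_iff.mp hc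
        rw [List.drop_eq_getElem_cons hlt]
        simp_all
      by_cases hci : c = i
      · subst hci
        by_cases hfin : k + 1 = s.length
        · have : s.drop (k + 1) = [] := by simp [hfin]
          simp [lettersInSeqGoA, hend, hc, hfin, hdrop, lettersInSeqGreedy,
            greedy_nil_left]
        · rw [lettersInSeqGoA]
          simp only [hend, hc, if_neg hfin, hdrop]
          rw [ih s (acc ++ [c]) (k + 1) hlt]
          simp [lettersInSeqGreedy]
      · rw [lettersInSeqGoA]
        have hne : ¬ s[k]? = some i := by simp [hc, hci]
        simp only [if_neg hend, if_neg hne]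
        rw [ih s acc k hk, hdrop]
        simp [lettersInSeqGreedy, hci]

lemma greedy_cons (c : Char) (rest : List Char) (m : List Char) :
    lettersInSeqGreedy (c :: rest) m =
      match m.idxOf? c with
      | none => []
      | some j => c :: lettersInSeqGreedy rest (m.drop (j + 1)) := by
  induction m with
  | nil => simp [lettersInSeqGreedy]
  | cons i m' ih =>
    by_cases hci : c = i
    · subst hci
      simp [lettersInSeqGreedy, List.idxOf?_cons]
    · have : (i == c) = false := by simp [Ne.symm hci]
      rw [lettersInSeqGreedy, if_neg hci, ih, List.idxOf?_cons, this]
      cases h : m'.idxOf? c <;> simp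

lemma goB_eq_greedy (l : List Char) :
    ∀ (s : List Char) (pos : Nat),
      lettersInSeqGoB l s pos = lettersInSeqGreedy s (l.drop pos) := by
  intro s
  induction s with
  | nil => intro pos; simp [lettersInSeqGoB, greedy_nil_left]
  | cons c rest ih =>
    intro pos
    rw [lettersInSeqGoB, greedy_cons]
    unfold lettersInSeqFindFrom
    cases h : (l.drop pos).idxOf? c with
    | none => simp
    | some j =>
      simp only [Option.map_some]
      rw [ih (pos + j + 1)]
      have : (l.drop pos).drop (j + 1) = l.drop (pos + j + 1) := by
        rw [List.drop_drop]; ring_nf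
      rw [this]

-- ===== VERDICT (by name: the statement is the Claim_ definition above) =====
theorem lettersInSeq_spec : Claim_equal_lettersInSeq := by
  intro short long _
  unfold Spec_lettersInSeq lettersInSeq lettersInSeq_alt
  rw [goA_eq_greedy long.toList short.toList [] 0 (Nat.zero_le _),
    goB_eq_greedy long.toList short.toList 0]
  simp
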